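-- pv_equiv track=rewrite | github.com/momofAnAl/sponge-problem | sponge.py | sponge_case
-- ===== SOURCE A (Python) =====
-- def sponge_case(sentence):
--     """
--     input a string
--     return a string with first word is lowercase and then following word is gonna be uppercase
--     if string one letter , return loswercase
--     assume string is all letters with / with out spaces
--     """
--
--     #intialize new_word with empty list
--     new_list = []
--     is_lower = True
--     for i in range(len(sentence)):
--         letter = sentence[i]
--         if letter == " ":
--             new_list.append(letter)
--             is_lower = True
--         else:
--             if is_lower:
--                 new_list.append(letter.lower())
--             else:
--                 new_list.append(letter.upper())
--
--             is_lower = not is_lower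
--
--
--     new_word = "".join(new_list)
--
--     return new_word
-- ===== SOURCE B (Python) =====
-- def sponge_case(sentence):
--     words = sentence.split(" ")
--     return " ".join(
--         "".join(c.lower() if i % 2 == 0 else c.upper() for i, c in enumerate(w))
--         for w in words
--     )
-- ===== Notes on version B (the rewrite author's own statement) =====
-- stated objective: idiomatic
-- what changed: Replaced the single character scan with a mutable case flag reset at spaces by a split-on-space / per-word index-parity transform / rejoin decomposition.
import Mathlib
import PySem

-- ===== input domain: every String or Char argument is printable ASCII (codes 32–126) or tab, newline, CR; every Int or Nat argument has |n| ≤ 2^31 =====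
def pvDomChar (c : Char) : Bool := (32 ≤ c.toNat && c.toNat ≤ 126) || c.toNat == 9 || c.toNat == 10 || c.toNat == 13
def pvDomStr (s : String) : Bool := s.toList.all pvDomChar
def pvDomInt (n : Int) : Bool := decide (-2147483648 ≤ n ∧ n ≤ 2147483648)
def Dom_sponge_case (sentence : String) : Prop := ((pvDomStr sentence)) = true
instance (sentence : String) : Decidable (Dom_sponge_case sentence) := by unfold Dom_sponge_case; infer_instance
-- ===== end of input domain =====

-- B re-decomposes A's flag-reset character scan as split(" ") / per-word index-parity casing / " ".join; same O(n) cost, no speed claim.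


-- ===== PORT A =====
-- A's loop: state (new_list, is_lower); letter.lower()/.upper() on a one-char ASCII string is Chars.lowerChar/upperChar on the char.
def spongeStepA (st : List Char × Bool) (c : Char) : List Char × Bool :=
  if c = ' ' then (st.1 ++ [c], true)
  else (st.1 ++ [if st.2 then PySem.Chars.lowerChar c else PySem.Chars.upperChar c], !st.2)

def sponge_case (sentence : String) : String :=
  String.mk (sentence.toList.foldl spongeStepA ([], true)).1

-- ===== PORT B =====
-- Source B's inner comprehension: enumerate the word, lowercase at even index, uppercase at odd.
def spongeWordB (w : List Char) : List Char :=
  (PySem.List.enumerate w).map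
    (fun ic => if ic.1 % 2 == 0 then PySem.Chars.lowerChar ic.2 else PySem.Chars.upperChar ic.2)

def sponge_case_alt (sentence : String) : String :=
  String.mk (PySem.Chars.join [' ']
    ((PySem.Chars.splitOn sentence.toList [' ']).map spongeWordB))

-- ===== PRECONDITION & SPEC =====
def Spec_sponge_case (sentence : String) (out : String) : Prop := out = sponge_case_alt sentence
instance (sentence : String) (out : String) : Decidable (Spec_sponge_case sentence out) := by unfold Spec_sponge_case; infer_instance

-- ===== CLAIM (what is proved, stated in full; the proofs are below) =====
def Claim_equal_sponge_case : Prop := ∀ (sentence : String), Dom_sponge_case sentence → Spec_sponge_case sentence (sponge_case sentence)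

-- ===== LEMMAS AND PROOFS =====

-- A's scan as a structural recursion with the flag.
def spongeGo : List Char → Bool → List Char
  | [], _ => []
  | c :: t, b =>
    if c = ' ' then ' ' :: spongeGo t true
    else (if b then PySem.Chars.lowerChar c else PySem.Chars.upperChar c) :: spongeGo t (!b)

theorem foldA_eq : ∀ (l : List Char) (cur : List Char) (b : Bool),
    (l.foldl spongeStepA (cur, b)).1 = cur ++ spongeGo l b := by
  intro l
  induction l with
  | nil => intro cur b; simp [spongeGo]
  | cons c t ih =>
    intro cur b
    by_cases h : c = ' '
    · simp [spongeStepA, spongeGo, h, ih]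
    · simp [spongeStepA, spongeGo, h, ih]

-- alternate case beginning with flag b
def fWord : Bool → List Char → List Char
  | _, [] => []
  | b, c :: t => (if b then PySem.Chars.lowerChar c else PySem.Chars.upperChar c) :: fWord (!b) t

-- split on ' ' as (first word, remaining words)
def mySplit : List Char → List Char × List (List Char)
  | [] => ([], [])
  | c :: t =>
    let p := mySplit t
    if c = ' ' then ([], p.1 :: p.2) else (c :: p.1, p.2)

theorem spongeGo_eq_split : ∀ (l : List Char) (b : Bool),
    spongeGo l b = fWord b (mySplit l).1
      ++ (mySplit l).2.flatMap (fun w => ' ' :: fWord true w) := by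
  intro l
  induction l with
  | nil => intro b; simp [spongeGo, mySplit, fWord]
  | cons c t ih =>
    intro b
    by_cases h : c = ' '
    · simp [spongeGo, mySplit, h, fWord, ih]
    · simp [spongeGo, mySplit, h, fWord, ih]

theorem go_eq_mySplit : ∀ (fuel : Nat) (l cur : List Char) (acc : List (List Char)),
    l.length < fuel →
    PySem.Chars.splitOn.go [' '] fuel l cur acc
      = acc.reverse ++ (cur.reverse ++ (mySplit l).1) :: (mySplit l).2 := by
  intro fuel
  induction fuel with
  | zero => intro l cur acc h; omega
  | succ fuel ih =>
    intro l cur acc h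
    cases l with
    | nil => simp [PySem.Chars.splitOn.go, mySplit]
    | cons c t =>
      by_cases hc : c = ' '
      · have : ([' '] : List Char).isPrefixOf (c :: t) = true := by
          simp [List.isPrefixOf, hc]
        rw [PySem.Chars.splitOn.go, if_pos this]
        have ht : t.length < fuel := by simp at h; omega
        rw [show List.drop ([' '] : List Char).length (c :: t) = t by simp]
        rw [ih t [] (cur.reverse :: acc) ht]
        simp [mySplit, hc]
      · have : ([' '] : List Char).isPrefixOf (c :: t) = false := by
          simp [List.isPrefixOf]
          exact fun he => (hc he.symm).elim
        rw [PySem.Chars.splitOn.go, if_neg (by simp [this])]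
        have ht : t.length < fuel := by simp at h; omega
        rw [ih t (c :: cur) acc ht]
        simp [mySplit, hc]

theorem splitOn_eq_mySplit (l : List Char) :
    PySem.Chars.splitOn l [' '] = (mySplit l).1 :: (mySplit l).2 := by
  have := go_eq_mySplit (l.length + 1) l [] [] (by omega)
  simpa [PySem.Chars.splitOn] using this

theorem intercalate_space (xs : List (List Char)) (x : List Char) :
    ([' '] : List Char).intercalate (x :: xs)
      = x ++ xs.flatMap (fun w => ' ' :: w) := by
  induction xs generalizing x with
  | nil => simp [List.intercalate]
  | cons y ys ih =>
    have := ih y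
    simp only [List.intercalate, List.intersperse] at this ⊢
    simp [this]

theorem spongeWordB_eq_fWord_aux : ∀ (w : List Char) (k : Int),
    (PySem.List.enumerate w k).map
      (fun ic => if ic.1 % 2 == 0 then PySem.Chars.lowerChar ic.2 else PySem.Chars.upperChar ic.2)
      = fWord (decide (k % 2 = 0)) w := by
  intro w
  induction w with
  | nil => intro k; simp [PySem.List.enumerate, fWord]
  | cons c t ih =>
    intro k
    rw [PySem.List.enumerate_cons, List.map_cons, ih (k + 1), fWord]
    have hb : decide ((k + 1) % 2 = 0) = !decide (k % 2 = 0) := by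
      by_cases h : k % 2 = 0
      · have h1 : (k + 1) % 2 = 1 := by omega
        simp [h, h1]
      · have h1 : (k + 1) % 2 = 0 := by omega
        simp [h, h1]
    rw [hb]
    by_cases h : k % 2 = 0 <;> simp [h]

theorem spongeWordB_eq_fWord (w : List Char) : spongeWordB w = fWord true w := by
  have := spongeWordB_eq_fWord_aux w 0
  simpa [spongeWordB] using this

-- ===== VERDICT (by name: the statement is the Claim_ definition above) =====
theorem sponge_case_spec : Claim_equal_sponge_case := by
  intro s _
  unfold Spec_sponge_case sponge_case sponge_case_alt
  rw [foldA_eq, List.nil_append, spongeGo_eq_split, splitOn_eq_mySplit,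
    List.map_cons, PySem.Chars.join, intercalate_space, spongeWordB_eq_fWord]
  congr 1
  rw [List.flatMap_map]
  congr 1
  apply List.flatMap_congr
  intro w _
  rw [spongeWordB_eq_fWord]
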